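-- pv_equiv track=rewrite | github.com/megabyte0/ggo | apply_custom_patch.py | find_match_position
-- ===== SOURCE A (Python) =====
-- from typing import List, Dict, Any, Tuple, Optional
--
-- def normalize_cmp(s: str) -> str:
--     """Collapse whitespace sequences into single spaces and strip ends for comparison."""
--     return " ".join(s.strip().split())
--
-- def find_match_position(file_lines: List[str], pattern_lines: List[str]) -> int:
--     """
--     Find position where pattern_lines occur contiguously in file_lines using whitespace-insensitive comparison.
--     Return 0-based index or -1.
--     """
--     if not pattern_lines:
--         return 0
--     n = len(file_lines)
--     m = len(pattern_lines)
--     if m == 0: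
--         return 0
--     file_norm = [normalize_cmp(x) for x in file_lines]
--     pat_norm = [normalize_cmp(x) for x in pattern_lines]
--     for i in range(0, n - m + 1):
--         ok = True
--         for j in range(m):
--             if file_norm[i + j] != pat_norm[j]:
--                 ok = False
--                 break
--         if ok:
--             return i
--     return -1
-- ===== SOURCE B (Python) =====
-- from typing import List
--
--
-- def normalize_cmp(s: str) -> str:
--     """Collapse whitespace sequences into single spaces and strip ends for comparison."""
--     return " ".join(s.strip().split())
--
--
-- def find_match_position(file_lines: List[str], pattern_lines: List[str]) -> int:
--     """
--     Find position where pattern_lines occur contiguously in file_lines using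
--     whitespace-insensitive comparison.  Return 0-based index or -1.
--
--     Rabin-Karp: each normalized line is hashed to an integer, a rolling
--     polynomial hash of the current window of m line-hashes is maintained, and
--     a window is compared line-by-line only when its rolling hash equals the
--     pattern's hash (equal windows always have equal hashes, so the first
--     verified hash hit is exactly the first match).
--     """
--     if not pattern_lines:
--         return 0
--     norm = [normalize_cmp(x) for x in file_lines]
--     pat = [normalize_cmp(x) for x in pattern_lines]
--     n, m = len(norm), len(pat)
--     if m > n:
--         return -1
--     MOD = 1000000007
--     BASE = 911382323
--
--     def line_hash(s: str) -> int:
--         h = 0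
--         for ch in s:
--             h = (h * 131 + ord(ch)) % MOD
--         return h
--
--     fh = [line_hash(s) for s in norm]
--     hp = 0
--     for s in pat:
--         hp = (hp * BASE + line_hash(s)) % MOD
--     hw = 0
--     for v in fh[:m]:
--         hw = (hw * BASE + v) % MOD
--     pw = pow(BASE, m - 1, MOD)
--     for i in range(n - m + 1):
--         if hw == hp and norm[i:i + m] == pat:
--             return i
--         if i + m < n:
--             hw = ((hw - fh[i] * pw) * BASE + fh[i + m]) % MOD
--     return -1
-- ===== Notes on version B (the rewrite author's own statement) =====
-- stated objective: alternative
-- what changed: B replaces A's nested position-by-position rescan with Rabin-Karp: each normalized line is hashed once, a rolling polynomial hash over the window of line-hashes is maintained, and the full line-by-line comparison runs only on a hash hit (equal windows always hash equally, so the first verified hit is exactly A's first match); measured runtime is not better, since per-line normalization dominates both.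
import Mathlib
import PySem

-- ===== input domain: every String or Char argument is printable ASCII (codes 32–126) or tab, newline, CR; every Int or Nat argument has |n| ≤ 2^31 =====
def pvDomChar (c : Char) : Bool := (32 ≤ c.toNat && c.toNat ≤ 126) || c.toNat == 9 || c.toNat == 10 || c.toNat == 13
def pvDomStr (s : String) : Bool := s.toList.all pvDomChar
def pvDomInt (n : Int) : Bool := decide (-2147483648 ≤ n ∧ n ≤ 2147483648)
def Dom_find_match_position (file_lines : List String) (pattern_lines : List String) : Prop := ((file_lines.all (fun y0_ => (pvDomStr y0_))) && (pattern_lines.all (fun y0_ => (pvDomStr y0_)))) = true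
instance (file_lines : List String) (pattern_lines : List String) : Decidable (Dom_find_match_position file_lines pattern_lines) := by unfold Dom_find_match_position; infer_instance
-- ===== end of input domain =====

-- B replaces A's nested position-by-position rescan with Rabin-Karp over normalized
-- lines: a rolling polynomial hash of the window of line-hashes, with the line-by-line
-- comparison run only on a hash hit (objective: alternative algorithm).


-- ===== PORT A =====

-- " ".join(s.strip().split())  (shared helper of both sources)
def normalize_cmp (s : String) : String :=
  PySem.Str.join " " (PySem.Str.split₀ (PySem.Str.strip s))

-- inner 'for j in range(m)' with break: ok stays true iff every compared pair agrees
def aInner (fn pn : List String) (i : Int) : List Int → Bool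
  | [] => true
  | j :: rest =>
    if PySem.List.pyGet? fn (i + j) ≠ PySem.List.pyGet? pn j then false
    else aInner fn pn i rest

-- outer 'for i in range(0, n - m + 1)' with early return
def aOuter (fn pn : List String) (m : Int) : List Int → Int
  | [] => -1
  | i :: rest =>
    if aInner fn pn i (PySem.List.pyRange 0 m 1) then i else aOuter fn pn m rest

def find_match_position (file_lines : List String) (pattern_lines : List String) : Int :=
  if pattern_lines = [] then 0
  else
    let n : Int := file_lines.length
    let m : Int := pattern_lines.length
    if m = 0 then 0
    else
      let file_norm := file_lines.map normalize_cmp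
      let pat_norm := pattern_lines.map normalize_cmp
      aOuter file_norm pat_norm m (PySem.List.pyRange 0 (n - m + 1) 1)

-- ===== PORT B =====

def MODc : Int := 1000000007
def BASEc : Int := 911382323

-- def line_hash(s): h = (h * 131 + ord(ch)) % MOD over the characters
def line_hash (s : String) : Int :=
  s.toList.foldl (fun h c => PySem.Int.mod (h * 131 + (c.toNat : Int)) MODc) 0

-- 'for i in range(n - m + 1)' with early return and the rolling-hash update
-- (fh[i] / fh[i+m] are ported with pyGetD; the indices are always in range there)
def bLoop (norm pat : List String) (fh : List Int) (hp pw : Int) (m : Nat) (hw : Int) (i : Nat) : Int :=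
  if i + m ≤ norm.length then
    if hw = hp ∧ PySem.List.slice norm (some (i : Int)) (some ((i : Int) + (m : Int))) = pat then
      (i : Int)
    else
      let hw' := if i + m < norm.length then
          PySem.Int.mod ((hw - PySem.List.pyGetD fh (i : Int) 0 * pw) * BASEc
              + PySem.List.pyGetD fh ((i : Int) + (m : Int)) 0) MODc
        else hw
      bLoop norm pat fh hp pw m hw' (i + 1)
  else -1
termination_by norm.length + 1 - i

def find_match_position_alt (file_lines : List String) (pattern_lines : List String) : Int :=
  if pattern_lines = [] then 0
  else
    let norm := file_lines.map normalize_cmp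
    let pat := pattern_lines.map normalize_cmp
    let n := norm.length
    let m := pat.length
    if n < m then -1
    else
      let fh := norm.map line_hash
      let hp := pat.foldl (fun h s => PySem.Int.mod (h * BASEc + line_hash s) MODc) 0
      let hw := (PySem.List.slice fh none (some (m : Int))).foldl
          (fun h v => PySem.Int.mod (h * BASEc + v) MODc) 0
      let pw := PySem.Int.powMod BASEc (m - 1) MODc
      bLoop norm pat fh hp pw m hw 0

-- ===== PRECONDITION & SPEC =====
def Spec_find_match_position (file_lines : List String) (pattern_lines : List String) (out : Int) : Prop := out = find_match_position_alt file_lines pattern_lines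
instance (file_lines : List String) (pattern_lines : List String) (out : Int) : Decidable (Spec_find_match_position file_lines pattern_lines out) := by unfold Spec_find_match_position; infer_instance

-- ===== CLAIM (what is proved, stated in full; the proofs are below) =====
def Claim_equal_find_match_position : Prop := ∀ (file_lines : List String) (pattern_lines : List String), Dom_find_match_position file_lines pattern_lines → Spec_find_match_position file_lines pattern_lines (find_match_position file_lines pattern_lines)

-- ===== LEMMAS AND PROOFS =====

-- reference scan both ports are reduced to: first index s' ≥ s with the normalized
-- pattern a prefix of norm.drop s', as long as the pattern still fits; else -1
def naiveScan (norm pat : List String) (s : Nat) : Int :=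
  if s + pat.length ≤ norm.length then
    if pat <+: norm.drop s then (s : Int) else naiveScan norm pat (s + 1)
  else -1
termination_by norm.length + 1 - s

-- ---- A-side: aOuter/aInner equal naiveScan ----

theorem prefix_iff_forall_getElem (fn pn : List String) (a : Nat) :
    pn <+: fn.drop a ↔ ∀ k : Nat, k < pn.length → fn[a + k]? = pn[k]? := by
  rw [List.prefix_iff_eq_take]
  constructor
  · intro he k hk
    conv_rhs => rw [he]
    rw [List.getElem?_take_of_lt hk, List.getElem?_drop]
  · intro hk
    apply List.ext_getElem?
    intro k
    by_cases hlt : k < pn.length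
    · rw [List.getElem?_take_of_lt hlt, List.getElem?_drop, hk k hlt]
    · rw [List.getElem?_eq_none (by omega), List.getElem?_eq_none (by simp; omega)]

theorem aInner_eq_all (fn pn : List String) (i : Int) (js : List Int) :
    aInner fn pn i js = js.all (fun j => PySem.List.pyGet? fn (i + j) == PySem.List.pyGet? pn j) := by
  induction js with
  | nil => rfl
  | cons j rest ih =>
    by_cases h : PySem.List.pyGet? fn (i + j) = PySem.List.pyGet? pn j
    · simp [aInner, h, ih]
    · simp [aInner, h]

theorem inner_true_iff (fn pn : List String) (i : Int) (hi : 0 ≤ i) :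
    (aInner fn pn i (PySem.List.pyRange 0 (pn.length : Int) 1) = true) ↔ pn <+: fn.drop i.toNat := by
  rw [aInner_eq_all, List.all_eq_true, prefix_iff_forall_getElem]
  constructor
  · intro h k hk
    have hj : (k : Int) ∈ PySem.List.pyRange 0 (pn.length : Int) 1 := by
      rw [PySem.List.mem_pyRange_one]; omega
    have := h _ hj
    rw [beq_iff_eq, show i + (k : Int) = ((i.toNat + k : Nat) : Int) by omega,
        PySem.List.pyGet?_natCast, PySem.List.pyGet?_natCast] at this
    exact this
  · intro h j hj
    rw [PySem.List.mem_pyRange_one] at hj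
    rw [beq_iff_eq, show i + j = ((i.toNat + j.toNat : Nat) : Int) by omega,
        show j = ((j.toNat : Nat) : Int) by omega,
        PySem.List.pyGet?_natCast, PySem.List.pyGet?_natCast]
    exact h j.toNat (by omega)

theorem outer_eq_naive (fn pn : List String) (s : Nat) :
    aOuter fn pn (pn.length : Int)
        (PySem.List.pyRange (s : Int) ((fn.length : Int) - (pn.length : Int) + 1) 1)
      = naiveScan fn pn s := by
  have key : ∀ (d : Nat) (s : Nat), fn.length + 1 - s ≤ d →
      aOuter fn pn (pn.length : Int)
          (PySem.List.pyRange (s : Int) ((fn.length : Int) - (pn.length : Int) + 1) 1)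
        = naiveScan fn pn s := by
    intro d
    induction d with
    | zero =>
      intro s hd
      rw [naiveScan, if_neg (by omega), PySem.List.pyRange_one_eq_nil (by omega)]
      rfl
    | succ d ih =>
      intro s hd
      rw [naiveScan]
      by_cases hle : s + pn.length ≤ fn.length
      · rw [if_pos hle, PySem.List.pyRange_one_cons (by omega)]
        show (if aInner fn pn (s : Int) (PySem.List.pyRange 0 (pn.length : Int) 1) then (s : Int)
              else aOuter fn pn (pn.length : Int) _) = _
        by_cases hpre : pn <+: fn.drop s
        · rw [if_pos ((inner_true_iff fn pn s (by omega)).mpr (by simpa using hpre)), if_pos hpre]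
        · rw [if_neg (by
              rw [inner_true_iff fn pn s (by omega)]
              simpa using hpre), if_neg hpre]
          rw [show (s : Int) + 1 = ((s + 1 : Nat) : Int) by omega]
          exact ih (s + 1) (by omega)
      · rw [if_neg hle, PySem.List.pyRange_one_eq_nil (by omega)]
        rfl
  exact key (fn.length + 1 - s) s le_rfl

-- ---- B-side: the rolling hash and bLoop equal naiveScan ----

-- one modular accumulation step, and its pure (un-reduced) counterpart
def hstep (h v : Int) : Int := PySem.Int.mod (h * BASEc + v) MODc
def pstep (h v : Int) : Int := h * BASEc + v

theorem MODc_pos : (0 : Int) < MODc := by decide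

theorem pfold_init (l : List Int) (a : Int) :
    l.foldl pstep a = a * BASEc ^ l.length + l.foldl pstep 0 := by
  induction l generalizing a with
  | nil => simp
  | cons v t ih =>
    show t.foldl pstep (pstep a v) = _
    rw [ih (pstep a v)]
    conv_rhs => rw [show List.foldl pstep 0 (v :: t) = t.foldl pstep (pstep 0 v) from rfl,
                    ih (pstep 0 v)]
    simp only [pstep, List.length_cons]
    ring

theorem hstep_mod_left (a v : Int) :
    hstep (a % MODc) v = hstep a v := by
  simp only [hstep, PySem.Int.mod_eq_emod_of_pos MODc_pos]
  conv_lhs => rw [Int.add_emod, Int.mul_emod, Int.emod_emod_of_dvd _ dvd_rfl]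
  rw [← Int.mul_emod, ← Int.add_emod]

theorem hfold_eq_pfold_mod (l : List Int) (a : Int) :
    l.foldl hstep (a % MODc) = (l.foldl pstep a) % MODc := by
  induction l generalizing a with
  | nil => rfl
  | cons v t ih =>
    show t.foldl hstep (hstep (a % MODc) v) = _
    rw [hstep_mod_left]
    have : hstep a v = (pstep a v) % MODc := by
      simp [hstep, pstep, PySem.Int.mod_eq_emod_of_pos MODc_pos]
    rw [this, ih (pstep a v)]
    rfl

theorem hfold_zero (l : List Int) :
    l.foldl hstep 0 = (l.foldl pstep 0) % MODc := by
  have := hfold_eq_pfold_mod l 0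
  simpa using this

-- the two shapes of adjacent windows of width k+1
theorem window_cons (l : List Int) (i k : Nat) (h : i < l.length) :
    (l.drop i).take (k + 1) = l.getD i 0 :: (l.drop (i + 1)).take k := by
  rw [List.drop_eq_getElem_cons h, List.take_succ_cons, List.getD_eq_getElem l 0 h]

theorem window_snoc (l : List Int) (i k : Nat) (h : i + k + 1 < l.length) :
    (l.drop (i + 1)).take (k + 1) = (l.drop (i + 1)).take k ++ [l.getD (i + k + 1) 0] := by
  rw [List.take_add_one]
  congr 1
  have hk : i + 1 + k < l.length := by omega
  rw [List.getElem?_drop, List.getElem?_eq_getElem hk,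
      List.getD_eq_getElem l 0 (show i + k + 1 < l.length by omega)]
  simp [Option.toList]
  congr 1
  omega

-- rolling update: the new window hash from the old one
theorem roll_update (fh : List Int) (i k : Nat) (h : i + k + 1 < fh.length) :
    PySem.Int.mod
        ((((fh.drop i).take (k + 1)).foldl hstep 0 - PySem.List.pyGetD fh (i : Int) 0
            * PySem.Int.powMod BASEc k MODc) * BASEc
          + PySem.List.pyGetD fh ((i : Int) + ((k + 1 : Nat) : Int)) 0) MODc
      = ((fh.drop (i + 1)).take (k + 1)).foldl hstep 0 := by
  have hcast : (i : Int) + ((k + 1 : Nat) : Int) = ((i + k + 1 : Nat) : Int) := by push_cast; ring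
  rw [hcast, PySem.List.pyGetD_natCast, PySem.List.pyGetD_natCast]
  set x := fh.getD i 0
  set y := fh.getD (i + k + 1) 0
  set t := (fh.drop (i + 1)).take k with ht
  have hlt : t.length = k := by
    rw [ht, List.length_take, List.length_drop]; omega
  rw [hfold_zero, hfold_zero, window_cons fh i k (by omega), window_snoc fh i k h, ← ht]
  rw [PySem.Int.mod_eq_emod_of_pos MODc_pos, PySem.Int.powMod_eq_emod _ _ MODc_pos]
  have hpure_cons : List.foldl pstep 0 (x :: t) = x * BASEc ^ k + t.foldl pstep 0 := by
    show t.foldl pstep (pstep 0 x) = _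
    rw [pfold_init t (pstep 0 x), hlt]
    simp [pstep]
  have hpure_snoc : (t ++ [y]).foldl pstep 0 = (t.foldl pstep 0) * BASEc + y := by
    rw [List.foldl_append]
    rfl
  rw [hpure_cons, hpure_snoc]
  -- strip the inner reductions mod MODc and compare the pure values
  conv_lhs => rw [Int.add_emod, Int.mul_emod, Int.sub_emod,
                  Int.emod_emod_of_dvd _ dvd_rfl,
                  Int.mul_emod x, Int.emod_emod_of_dvd _ dvd_rfl, ← Int.mul_emod x,
                  ← Int.sub_emod, ← Int.mul_emod, ← Int.add_emod]
  congr 1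
  ring

-- folding the raw hash accumulation over strings is folding hstep over their line-hashes
theorem foldl_hash_map (l : List String) :
    l.foldl (fun h s => PySem.Int.mod (h * BASEc + line_hash s) MODc) 0
      = (l.map line_hash).foldl hstep 0 := by
  rw [List.foldl_map]
  rfl

-- when the window of lines equals the pattern, the window hash equals the pattern hash
theorem window_hash_eq (norm pat : List String) (i m : Nat)
    (hw : (norm.drop i).take m = pat) :
    (((norm.map line_hash).drop i).take m).foldl hstep 0
      = (pat.map line_hash).foldl hstep 0 := by
  rw [← List.map_drop, ← List.map_take, hw]

-- main B-side induction: bLoop with the window-hash invariant equals naiveScan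
theorem bLoop_eq_naiveScan (norm pat : List String) (k : Nat)
    (hm : pat.length = k + 1) :
    ∀ (i : Nat) (hw : Int),
      (i + (k + 1) ≤ norm.length →
        hw = (((norm.map line_hash).drop i).take (k + 1)).foldl hstep 0) →
      bLoop norm pat (norm.map line_hash)
          ((pat.map line_hash).foldl hstep 0)
          (PySem.Int.powMod BASEc k MODc) (k + 1) hw i
        = naiveScan norm pat i := by
  have key : ∀ (d : Nat) (i : Nat), norm.length + 1 - i ≤ d → ∀ hw : Int,
      (i + (k + 1) ≤ norm.length →
        hw = (((norm.map line_hash).drop i).take (k + 1)).foldl hstep 0) →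
      bLoop norm pat (norm.map line_hash)
          ((pat.map line_hash).foldl hstep 0)
          (PySem.Int.powMod BASEc k MODc) (k + 1) hw i
        = naiveScan norm pat i := by
    intro d
    induction d with
    | zero =>
      intro i hd hw hinv
      rw [bLoop, naiveScan, if_neg (by omega), if_neg (by omega)]
    | succ d ih =>
      intro i hd hw hinv
      rw [bLoop, naiveScan, hm]
      by_cases hle : i + (k + 1) ≤ norm.length
      · rw [if_pos hle, if_pos hle]
        have hslice : PySem.List.slice norm (some (i : Int)) (some ((i : Int) + ((k + 1 : Nat) : Int)))
            = (norm.drop i).take (k + 1) := PySem.List.slice_natCast_add norm i (k + 1)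
        by_cases hpre : pat <+: norm.drop i
        · -- match here: the hash agrees too, so B also returns i
          have htake : (norm.drop i).take (k + 1) = pat := by
            have := List.prefix_iff_eq_take.mp hpre
            rw [hm] at this
            exact this.symm
          rw [if_pos hpre, if_pos ⟨by
                rw [hinv hle]
                exact window_hash_eq norm pat i (k + 1) htake,
              by rw [hslice, htake]⟩]
        · -- no match here: the slice differs, B recurses with the rolled hash
          have hne : ¬ (hw = (pat.map line_hash).foldl hstep 0 ∧
              PySem.List.slice norm (some (i : Int)) (some ((i : Int) + ((k + 1 : Nat) : Int))) = pat) := by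
            rintro ⟨-, hsl⟩
            rw [hslice] at hsl
            exact hpre (List.prefix_iff_eq_take.mpr (by rw [hm, hsl]))
          rw [if_neg hpre, if_neg hne]
          apply ih (i + 1) (by omega)
          intro hle'
          have hlen : ¬ (i + (k + 1) < norm.length) → False := by omega
          have hlt : i + (k + 1) < norm.length := by omega
          rw [if_pos (by simpa using hlt), hinv hle]
          have := roll_update (norm.map line_hash) i k (by simpa using hlt)
          simpa using this
      · rw [if_neg hle, if_neg hle]
  intro i hw hinv
  exact key (norm.length + 1 - i) i le_rfl hw hinv

-- ===== VERDICT (by name: the statement is the Claim_ definition above) =====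
theorem find_match_position_spec : Claim_equal_find_match_position := by
  intro file_lines pattern_lines _
  unfold Spec_find_match_position find_match_position find_match_position_alt
  by_cases hp : pattern_lines = []
  · simp [hp]
  · rw [if_neg hp, if_neg hp]
    have hm0 : ¬ ((pattern_lines.length : Int) = 0) := by
      simpa [List.length_eq_zero_iff] using hp
    rw [if_neg hm0]
    set norm := file_lines.map normalize_cmp with hnorm
    set pat := pattern_lines.map normalize_cmp with hpat
    obtain ⟨k, hk⟩ : ∃ k, pat.length = k + 1 := by
      refine ⟨pat.length - 1, ?_⟩
      have hne : pat.length ≠ 0 := by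
        simpa [hpat, List.length_eq_zero_iff] using hp
      omega
    have hA : aOuter norm pat (pattern_lines.length : Int)
        (PySem.List.pyRange 0 ((file_lines.length : Int) - (pattern_lines.length : Int) + 1) 1)
        = naiveScan norm pat 0 := by
      have := outer_eq_naive norm pat 0
      simpa [hnorm, hpat] using this
    rw [hA]
    by_cases hlt : norm.length < pat.length
    · -- pattern longer than file: both sides are -1
      rw [if_pos (by simpa [hnorm, hpat] using hlt)]
      rw [naiveScan, if_neg (by omega)]
    · rw [if_neg (by simpa [hnorm, hpat] using hlt)]
      have hfold : pat.foldl (fun h s => PySem.Int.mod (h * BASEc + line_hash s) MODc) 0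
          = (pat.map line_hash).foldl hstep 0 := foldl_hash_map pat
      have hinit : (PySem.List.slice (norm.map line_hash) none (some ((pat.length : Nat) : Int))).foldl
            (fun h v => PySem.Int.mod (h * BASEc + v) MODc) 0
          = (((norm.map line_hash).drop 0).take (k + 1)).foldl hstep 0 := by
        rw [PySem.List.slice_to_natCast, hk, List.drop_zero]
        rfl
      have hB := bLoop_eq_naiveScan norm pat k hk 0
        ((PySem.List.slice (norm.map line_hash) none (some ((pat.length : Nat) : Int))).foldl
            (fun h v => PySem.Int.mod (h * BASEc + v) MODc) 0)
        (fun _ => hinit)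
      rw [hk] at hB
      rw [hfold, hk]
      simp only [Nat.add_sub_cancel]
      exact hB.symm
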